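-- pv_equiv track=rewrite | github.com/Kidus-M/A2SV_leetcode- | Codeforces - A2SV Contest 32/E. Race Against Time.py | check
-- ===== SOURCE A (Python) =====
-- import heapq
--
-- def check(L, dist_bus_to_n, graph, n, t1, t2, t0):
--     INF = 10**18
--     dist = [INF] * (n + 1)
--     dist[1] = L
--     pq = [(L, 1)]
--     while pq:
--         d, u = heapq.heappop(pq)
--         if d > dist[u]:
--             continue
--         for v, l1, l2 in graph[u]:
--             # walk
--             nd = d + l2
--             if nd < dist[v]:
--                 dist[v] = nd
--                 heapq.heappush(pq, (nd, v))
--             # bus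
--             if d + l1 <= t1 or d >= t2:
--                 nd = d + l1
--                 if nd < dist[v]:
--                     dist[v] = nd
--                     heapq.heappush(pq, (nd, v))
--     min_arr = dist[n] if dist[n] < INF else INF
--     for u in range(1, n + 1):
--         if dist[u] < INF and dist[u] <= t2:
--             cand = t2 + dist_bus_to_n[u]
--             if cand < min_arr:
--                 min_arr = cand
--     return min_arr <= t0
-- ===== SOURCE B (Python) =====
-- def check(L, dist_bus_to_n, graph, n, t1, t2, t0):
--     INF = 10**18
--     dist = [INF] * (n + 1)
--     dist[1] = L
--     visited = [False] * (n + 1)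
--     for _ in range(n):
--         best, u = INF, -1
--         for x in range(1, n + 1):
--             if not visited[x] and dist[x] < best:
--                 best, u = dist[x], x
--         if u == -1:
--             break
--         visited[u] = True
--         d = dist[u]
--         for v, l1, l2 in graph[u]:
--             # walk
--             nd = d + l2
--             if nd < dist[v]:
--                 dist[v] = nd
--             # bus
--             if d + l1 <= t1 or d >= t2:
--                 nd = d + l1
--                 if nd < dist[v]:
--                     dist[v] = nd
--     min_arr = dist[n] if dist[n] < INF else INF
--     for u in range(1, n + 1):
--         if dist[u] < INF and dist[u] <= t2:
--             cand = t2 + dist_bus_to_n[u]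
--             if cand < min_arr:
--                 min_arr = cand
--     return min_arr <= t0
-- ===== Notes on version B (the rewrite author's own statement) =====
-- stated objective: simpler
-- what changed: Replaced the heapq priority queue (with stale-entry skipping) by a plain O(V^2) array-scan Dijkstra: a visited[] array and, n times, a linear scan for the unvisited node of minimum dist; the relaxation rules and the final deadline loop are unchanged.
-- outside the precondition, e.g. on check(0, [0, 0, 0], [[(2, 0, 1)], [(0, 0, 0)], []], 2, 100, 100, 50): A returns True, B returns False
import Mathlib
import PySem

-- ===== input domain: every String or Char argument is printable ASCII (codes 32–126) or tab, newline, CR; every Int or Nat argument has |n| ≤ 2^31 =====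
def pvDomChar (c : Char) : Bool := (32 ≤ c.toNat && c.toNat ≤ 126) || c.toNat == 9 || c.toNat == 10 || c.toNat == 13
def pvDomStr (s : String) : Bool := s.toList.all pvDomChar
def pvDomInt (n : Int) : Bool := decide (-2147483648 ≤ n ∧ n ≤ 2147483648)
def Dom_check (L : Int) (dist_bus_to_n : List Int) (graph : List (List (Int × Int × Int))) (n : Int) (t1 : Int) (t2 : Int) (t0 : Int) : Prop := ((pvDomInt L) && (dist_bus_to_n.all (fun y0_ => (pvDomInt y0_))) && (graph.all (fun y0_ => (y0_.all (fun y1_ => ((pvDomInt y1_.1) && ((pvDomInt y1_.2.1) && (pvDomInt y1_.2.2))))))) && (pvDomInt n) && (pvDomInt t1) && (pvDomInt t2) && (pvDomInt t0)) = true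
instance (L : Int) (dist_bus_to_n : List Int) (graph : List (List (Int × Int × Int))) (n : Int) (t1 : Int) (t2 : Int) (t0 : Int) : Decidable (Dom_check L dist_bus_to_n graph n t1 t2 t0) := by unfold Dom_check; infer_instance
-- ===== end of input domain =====

-- B re-implements A's heapq Dijkstra as an array-scan Dijkstra (visited[] + linear
-- minimum scan, same relaxation rules and final deadline loop): simpler machinery, no
-- heap and no stale-entry skipping; no speed claim.
-- ===== PORT A =====
-- A uses heapq; PySem has no heap, so the queue is ported by hand as a min-multiset:
-- heappop returns the minimum element of the heap (exact: only the sequence of popped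
-- values is observable), heappush appends to the multiset.
def pvINF : Int := 10 ^ 18

def pvLe (a b : Int × Int) : Bool := a.1 < b.1 || (a.1 == b.1 && a.2 ≤ b.2)

-- heappop: remove and return the minimum (d, u) of the multiset
def popMin : List (Int × Int) → Option ((Int × Int) × List (Int × Int))
  | [] => none
  | x :: xs =>
    match popMin xs with
    | none => some (x, [])
    | some (m, r) => if pvLe x m then some (x, xs) else some (m, x :: r)

-- body of A's 'for v, l1, l2 in graph[u]' loop; state = (dist, pq)
def relaxA (t1 t2 d : Int) (st : List Int × List (Int × Int)) (e : Int × Int × Int) :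
    List Int × List (Int × Int) :=
  let v := e.1; let l1 := e.2.1; let l2 := e.2.2
  -- walk
  let nd := d + l2
  let st1 := if nd < PySem.List.pyGetD st.1 v 0
             then (PySem.List.pySetD st.1 v nd, st.2 ++ [(nd, v)]) else st
  -- bus
  if d + l1 ≤ t1 ∨ d ≥ t2 then
    let nd2 := d + l1
    if nd2 < PySem.List.pyGetD st1.1 v 0
    then (PySem.List.pySetD st1.1 v nd2, st1.2 ++ [(nd2, v)]) else st1
  else st1

-- A's 'while pq:' loop; fuel only makes the recursion total (sufficient under Pre_)
def loopA (graph : List (List (Int × Int × Int))) (t1 t2 : Int) :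
    Nat → List (Int × Int) → List Int → List Int
  | 0, _, dist => dist
  | fuel + 1, pq, dist =>
    match popMin pq with
    | none => dist
    | some ((d, u), rest) =>
      if d > PySem.List.pyGetD dist u 0 then loopA graph t1 t2 fuel rest dist
      else
        let st := (PySem.List.pyGetD graph u []).foldl (relaxA t1 t2 d) (dist, rest)
        loopA graph t1 t2 fuel st.2 st.1

-- final 'min_arr' loop (identical in A and B's Python)
def finishA (dist_bus_to_n dist : List Int) (n t2 t0 : Int) : Bool :=
  let m0 := if PySem.List.pyGetD dist n 0 < pvINF then PySem.List.pyGetD dist n 0 else pvINF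
  let m := (PySem.List.pyRange 1 (n + 1) 1).foldl (fun m u =>
      if PySem.List.pyGetD dist u 0 < pvINF ∧ PySem.List.pyGetD dist u 0 ≤ t2 then
        let cand := t2 + PySem.List.pyGetD dist_bus_to_n u 0
        if cand < m then cand else m
      else m) m0
  decide (m ≤ t0)

def check (L : Int) (dist_bus_to_n : List Int) (graph : List (List (Int × Int × Int))) (n : Int) (t1 : Int) (t2 : Int) (t0 : Int) : Bool :=
  let dist0 := List.replicate (n + 1).toNat pvINF
  let dist1 := PySem.List.pySetD dist0 1 L
  -- fuel: 1 + 2·(number of edges on rows 1..n) + slack bounds the loop iterations under Pre_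
  let fuel := 1 + 2 * ((PySem.List.pyRange 1 (n + 1) 1).map
      (fun x => (PySem.List.pyGetD graph x []).length)).sum + (n + 1).toNat
  let distF := loopA graph t1 t2 fuel [(L, 1)] dist1
  finishA dist_bus_to_n distF n t2 t0

-- ===== PORT B =====
-- body of B's relaxation loop (same two rules as A, no queue)
def relaxB (t1 t2 d : Int) (dist : List Int) (e : Int × Int × Int) : List Int :=
  let v := e.1; let l1 := e.2.1; let l2 := e.2.2
  let nd := d + l2
  let dist1 := if nd < PySem.List.pyGetD dist v 0 then PySem.List.pySetD dist v nd else dist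
  if d + l1 ≤ t1 ∨ d ≥ t2 then
    let nd2 := d + l1
    if nd2 < PySem.List.pyGetD dist1 v 0 then PySem.List.pySetD dist1 v nd2 else dist1
  else dist1

-- B's inner scan: first unvisited node of minimum dist (state = (best, u))
def scanMin (dist : List Int) (visited : List Bool) (n : Int) : Int × Int :=
  (PySem.List.pyRange 1 (n + 1) 1).foldl (fun bu x =>
      if ¬ PySem.List.pyGetD visited x false = true ∧ PySem.List.pyGetD dist x 0 < bu.1
      then (PySem.List.pyGetD dist x 0, x) else bu) (pvINF, -1)

-- B's 'for _ in range(n)' loop, structural recursion on the remaining iteration count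
def loopB (graph : List (List (Int × Int × Int))) (t1 t2 n : Int) :
    Nat → List Bool → List Int → List Int
  | 0, _, dist => dist
  | k + 1, visited, dist =>
    let bu := scanMin dist visited n
    if bu.2 == -1 then dist
    else
      let visited' := PySem.List.pySetD visited bu.2 true
      let d := PySem.List.pyGetD dist bu.2 0
      let dist' := (PySem.List.pyGetD graph bu.2 []).foldl (relaxB t1 t2 d) dist
      loopB graph t1 t2 n k visited' dist'

def check_alt (L : Int) (dist_bus_to_n : List Int) (graph : List (List (Int × Int × Int))) (n : Int) (t1 : Int) (t2 : Int) (t0 : Int) : Bool :=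
  let dist0 := List.replicate (n + 1).toNat pvINF
  let dist1 := PySem.List.pySetD dist0 1 L
  let visited0 := List.replicate (n + 1).toNat false
  let distF := loopB graph t1 t2 n n.toNat visited0 dist1
  finishA dist_bus_to_n distF n t2 t0

-- ===== PRECONDITION & SPEC =====
-- Domain description helpers: the set of node ids A's loop can ever touch is the plain
-- closure of {1} under the adjacency lists (the walk relaxation reads dist[v] for every
-- edge of every processed node), computed here by n iterated expansions.
def pvAdj (graph : List (List (Int × Int × Int))) (x : Int) : List Int :=
  (PySem.List.pyGetD graph x []).map (fun e => e.1)

def reachStep (graph : List (List (Int × Int × Int))) (R : List Int) : List Int :=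
  R.foldl (fun acc x => PySem.Set.update acc (pvAdj graph x)) R

def reachIter (graph : List (List (Int × Int × Int))) : Nat → List Int
  | 0 => [1]
  | k + 1 => reachStep graph (reachIter graph k)

-- every id the closure can ever add is node 1 or the target of some edge, so
-- (total number of edges) + 1 expansions reach the fixpoint
def pvReach (graph : List (List (Int × Int × Int))) : List Int :=
  reachIter graph ((graph.map List.length).sum + 1)

-- a touched node id must be a real 1-indexed node with indexable rows and
-- nonnegative edge lengths out of it
def GoodNode (dist_bus_to_n : List Int) (graph : List (List (Int × Int × Int))) (n x : Int) : Prop :=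
  1 ≤ x ∧ x ≤ n ∧ x < (graph.length : Int) ∧ x < (dist_bus_to_n.length : Int) ∧
  ∀ e ∈ PySem.List.pyGetD graph x [], 1 ≤ e.1 ∧ e.1 ≤ n ∧ 0 ≤ e.2.1 ∧ 0 ≤ e.2.2

-- Pre_ excludes (a) inputs on which A raises IndexError (n < 1, or a node id / list index
-- actually touched by the search that is out of range) and (b) inputs whose touched part of
-- the graph leaves the problem's natural domain — node ids outside 1..n (A follows Python's
-- negative-index wraparound there) or negative travel times (A's heap loop leaves Dijkstra's
-- regime and can even loop forever on a negative cycle); B, a plain Dijkstra over nodes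
-- 1..n, does not follow A there.  Rows of the graph the search never touches are free.
def Pre_check (L : Int) (dist_bus_to_n : List Int) (graph : List (List (Int × Int × Int))) (n : Int) (t1 : Int) (t2 : Int) (t0 : Int) : Prop :=
  1 ≤ n ∧ ∀ x ∈ pvReach graph, GoodNode dist_bus_to_n graph n x
instance (L : Int) (dist_bus_to_n : List Int) (graph : List (List (Int × Int × Int))) (n : Int) (t1 : Int) (t2 : Int) (t0 : Int) : Decidable (Pre_check L dist_bus_to_n graph n t1 t2 t0) := by unfold Pre_check GoodNode; infer_instance

def pvWitness_check : Int × List Int × (List (List (Int × Int × Int))) × Int × Int × Int × Int :=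
  (0, [0, 3, 1], [[], [(2, 5, 9)], [(1, 5, 9)]], 2, 4, 7, 8)

def Spec_check (L : Int) (dist_bus_to_n : List Int) (graph : List (List (Int × Int × Int))) (n : Int) (t1 : Int) (t2 : Int) (t0 : Int) (out : Bool) : Prop := out = check_alt L dist_bus_to_n graph n t1 t2 t0
instance (L : Int) (dist_bus_to_n : List Int) (graph : List (List (Int × Int × Int))) (n : Int) (t1 : Int) (t2 : Int) (t0 : Int) (out : Bool) : Decidable (Spec_check L dist_bus_to_n graph n t1 t2 t0 out) := by unfold Spec_check; infer_instance

-- ===== CLAIM (what is proved, stated in full; the proofs are below) =====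
def Claim_equal_check : Prop := ∀ (L : Int) (dist_bus_to_n : List Int) (graph : List (List (Int × Int × Int))) (n : Int) (t1 : Int) (t2 : Int) (t0 : Int), Dom_check L dist_bus_to_n graph n t1 t2 t0 → Pre_check L dist_bus_to_n graph n t1 t2 t0 → Spec_check L dist_bus_to_n graph n t1 t2 t0 (check L dist_bus_to_n graph n t1 t2 t0)

-- ===== LEMMAS AND PROOFS =====

-- ---- generic indexing bridge ----
theorem pyGetD_set_int {α : Type} (xs : List α) (v x : Int) (nd dflt : α)
    (hv0 : 0 ≤ v) (hvlen : v < (xs.length : Int)) (hx0 : 0 ≤ x) :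
    PySem.List.pyGetD (PySem.List.pySetD xs v nd) x dflt =
      if x = v then nd else PySem.List.pyGetD xs x dflt := by
  rw [PySem.List.pySetD_of_nonneg xs nd hv0]
  by_cases hx : x < (xs.length : Int)
  · rw [PySem.List.pyGetD_eq_getElem _ dflt hx0 (by simpa using hx),
        PySem.List.pyGetD_eq_getElem _ dflt hx0 hx,
        List.getElem_set]
    by_cases hxv : x = v
    · simp [hxv]
    · have : ¬ v.toNat = x.toNat := by omega
      simp [this, hxv]
  · have h1 : PySem.List.pyGet? (xs.set v.toNat nd) x = none := by
      rw [PySem.List.pyGet?_eq_none_iff]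
      unfold PySem.Raise.InRange
      simp only [List.length_set]
      omega
    have h2 : PySem.List.pyGet? xs x = none := by
      rw [PySem.List.pyGet?_eq_none_iff]
      unfold PySem.Raise.InRange
      omega
    rw [PySem.List.pyGetD_of_none _ _ _ h1, PySem.List.pyGetD_of_none _ _ _ h2]
    have : ¬ x = v := by omega
    simp [this]

theorem pvLe_iff (a b : Int × Int) : pvLe a b = true ↔ a.1 < b.1 ∨ (a.1 = b.1 ∧ a.2 ≤ b.2) := by
  simp [pvLe]

-- ---- popMin (the heap as a min-multiset) ----
def nodeDistinct (a b : Int × Int) : Prop := a.2 = b.2 → a.1 ≠ b.1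

theorem nodeDistinct_symm : Symmetric nodeDistinct := by
  intro a b h he hv; exact h he.symm hv.symm

theorem popMin_eq_none {pq : List (Int × Int)} : popMin pq = none ↔ pq = [] := by
  cases pq with
  | nil => simp [popMin]
  | cons x xs =>
    simp only [popMin]
    cases h' : popMin xs with
    | none => simp
    | some mr => obtain ⟨m, r⟩ := mr; simp only []; split <;> simp

theorem popMin_perm {pq : List (Int × Int)} {m : Int × Int} {r : List (Int × Int)}
    (h : popMin pq = some (m, r)) : pq.Perm (m :: r) := by
  induction pq generalizing m r with
  | nil => simp [popMin] at h
  | cons x xs ih =>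
    simp only [popMin] at h
    cases h' : popMin xs with
    | none =>
      rw [h'] at h
      simp only [Option.some.injEq, Prod.mk.injEq] at h
      obtain ⟨rfl, rfl⟩ := h
      rw [popMin_eq_none.mp h']
    | some mr =>
      obtain ⟨m', r'⟩ := mr
      rw [h'] at h
      simp only [] at h
      split at h
      · simp only [Option.some.injEq, Prod.mk.injEq] at h
        obtain ⟨rfl, rfl⟩ := h
        exact List.Perm.refl _
      · simp only [Option.some.injEq, Prod.mk.injEq] at h
        obtain ⟨rfl, rfl⟩ := h
        exact ((ih h').cons x).trans (List.Perm.swap _ _ _)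

theorem pvLe_refl (a : Int × Int) : pvLe a a = true := by
  rw [pvLe_iff]; omega

theorem pvLe_trans {a b c : Int × Int} (h1 : pvLe a b = true) (h2 : pvLe b c = true) :
    pvLe a c = true := by
  rw [pvLe_iff] at *; omega

theorem pvLe_total (a b : Int × Int) (h : ¬ pvLe a b = true) : pvLe b a = true := by
  rw [pvLe_iff] at *; omega

theorem popMin_min {pq : List (Int × Int)} {m : Int × Int} {r : List (Int × Int)}
    (h : popMin pq = some (m, r)) : ∀ p ∈ pq, pvLe m p = true := by
  induction pq generalizing m r with
  | nil => simp [popMin] at h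
  | cons x xs ih =>
    simp only [popMin] at h
    cases h' : popMin xs with
    | none =>
      rw [h'] at h
      simp only [Option.some.injEq, Prod.mk.injEq] at h
      obtain ⟨rfl, rfl⟩ := h
      rw [popMin_eq_none.mp h']
      intro p hp
      simp only [List.mem_singleton] at hp
      subst hp; exact pvLe_refl _
    | some mr =>
      obtain ⟨m', r'⟩ := mr
      rw [h'] at h
      simp only [] at h
      split at h <;> rename_i hle <;>
        simp only [Option.some.injEq, Prod.mk.injEq] at h <;> obtain ⟨rfl, rfl⟩ := h
      · intro p hp
        rcases List.mem_cons.mp hp with rfl | hp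
        · exact pvLe_refl _
        · exact pvLe_trans hle (ih h' p hp)
      · intro p hp
        rcases List.mem_cons.mp hp with rfl | hp
        · exact pvLe_total _ _ hle
        · exact ih h' p hp

-- ---- the Dijkstra invariant relating A's heap state to B's visited/dist state ----
structure DijkInv (n : Int) (R : List Int) (pq : List (Int × Int)) (vis : List Bool) (dist : List Int) : Prop where
  hdl : dist.length = (n + 1).toNat
  hvl : vis.length = (n + 1).toNat
  hmem : ∀ x : Int, 1 ≤ x → x ≤ n → PySem.List.pyGetD vis x false = false →
      PySem.List.pyGetD dist x 0 < pvINF → (PySem.List.pyGetD dist x 0, x) ∈ pq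
  hent : ∀ p ∈ pq, 1 ≤ p.2 ∧ p.2 ≤ n ∧ PySem.List.pyGetD dist p.2 0 ≤ p.1 ∧
      (PySem.List.pyGetD vis p.2 false = true → PySem.List.pyGetD dist p.2 0 < p.1) ∧ p.1 < pvINF
  hvle : ∀ p ∈ pq, ∀ w : Int, 1 ≤ w → w ≤ n → PySem.List.pyGetD vis w false = true →
      PySem.List.pyGetD dist w 0 ≤ p.1
  hnd : pq.Pairwise nodeDistinct
  hub : ∀ x : Int, 1 ≤ x → x ≤ n → PySem.List.pyGetD dist x 0 ≤ pvINF
  hRq : ∀ p ∈ pq, p.2 ∈ R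

def EdgeOK (n : Int) (e : Int × Int × Int) : Prop := 1 ≤ e.1 ∧ e.1 ≤ n ∧ 0 ≤ e.2.1 ∧ 0 ≤ e.2.2

-- fold-step invariant for the relaxation loop (state dc = current dist, q = current queue)
structure RelaxH (n d u : Int) (vis : List Bool) (dc : List Int) (q : List (Int × Int)) : Prop where
  hdl : dc.length = (n + 1).toNat
  hdu : PySem.List.pyGetD dc u 0 = d
  hvd : ∀ x : Int, 1 ≤ x → x ≤ n → PySem.List.pyGetD vis x false = true →
      PySem.List.pyGetD dc x 0 ≤ d
  hub : ∀ x : Int, 1 ≤ x → x ≤ n → PySem.List.pyGetD dc x 0 ≤ pvINF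
  hq : ∀ p ∈ q, PySem.List.pyGetD dc p.2 0 ≤ p.1
  hqb : ∀ p ∈ q, 1 ≤ p.2 ∧ p.2 ≤ n
  hnd : q.Pairwise nodeDistinct

-- conclusions of one relaxation write / edge / whole fold
structure RelaxC (n d u : Int) (R : List Int) (vis : List Bool) (dc dc' : List Int) (P : List (Int × Int)) : Prop where
  hle : ∀ x : Int, 0 ≤ x → PySem.List.pyGetD dc' x 0 ≤ PySem.List.pyGetD dc x 0
  hfix : ∀ x : Int, 1 ≤ x → x ≤ n → PySem.List.pyGetD vis x false = true →
      PySem.List.pyGetD dc' x 0 = PySem.List.pyGetD dc x 0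
  hnew : ∀ x : Int, 1 ≤ x → x ≤ n →
      PySem.List.pyGetD dc' x 0 = PySem.List.pyGetD dc x 0 ∨ (PySem.List.pyGetD dc' x 0, x) ∈ P
  hP : ∀ p ∈ P, 1 ≤ p.2 ∧ p.2 ≤ n ∧ d ≤ p.1 ∧ p.1 < pvINF ∧
      PySem.List.pyGetD vis p.2 false = false ∧ p.2 ≠ u
  hPT : ∀ p ∈ P, p.2 ∈ R

theorem RelaxC.refl (n d u : Int) (R : List Int) (vis : List Bool) (dc : List Int) :
    RelaxC n d u R vis dc dc [] :=
  ⟨fun _ _ => le_refl _, fun _ _ _ _ => rfl, fun _ _ _ => Or.inl rfl, by simp, by simp⟩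

theorem RelaxC.comp {n d u : Int} {R : List Int} {vis : List Bool} {dc dc1 dc2 : List Int}
    {P1 P2 : List (Int × Int)}
    (C1 : RelaxC n d u R vis dc dc1 P1) (C2 : RelaxC n d u R vis dc1 dc2 P2) :
    RelaxC n d u R vis dc dc2 (P1 ++ P2) := by
  refine ⟨fun x hx => le_trans (C2.hle x hx) (C1.hle x hx),
    fun x h1 h2 h3 => (C2.hfix x h1 h2 h3).trans (C1.hfix x h1 h2 h3),
    fun x h1 h2 => ?_, fun p hp => ?_, fun p hp => ?_⟩
  · rcases C2.hnew x h1 h2 with h | h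
    · rcases C1.hnew x h1 h2 with h' | h'
      · exact Or.inl (h.trans h')
      · exact Or.inr (List.mem_append_left _ (h ▸ h'))
    · exact Or.inr (List.mem_append_right _ h)
  · rcases List.mem_append.mp hp with hp | hp
    · exact C1.hP p hp
    · exact C2.hP p hp
  · rcases List.mem_append.mp hp with hp | hp
    · exact C1.hPT p hp
    · exact C2.hPT p hp

theorem write_step (n d u : Int) (R : List Int) (vis : List Bool) (dc : List Int) (q : List (Int × Int))
    (v nd : Int) (H : RelaxH n d u vis dc q)
    (hn : 1 ≤ n) (hu1 : 1 ≤ u) (hu2 : u ≤ n)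
    (hv1 : 1 ≤ v) (hv2 : v ≤ n) (hge : d ≤ nd) (hvR : v ∈ R) :
    ∃ P0, (if nd < PySem.List.pyGetD dc v 0
            then (PySem.List.pySetD dc v nd, q ++ [(nd, v)]) else (dc, q)) =
          ((if nd < PySem.List.pyGetD dc v 0 then PySem.List.pySetD dc v nd else dc), q ++ P0) ∧
      P0.length ≤ 1 ∧
      RelaxH n d u vis (if nd < PySem.List.pyGetD dc v 0 then PySem.List.pySetD dc v nd else dc) (q ++ P0) ∧
      RelaxC n d u R vis dc (if nd < PySem.List.pyGetD dc v 0 then PySem.List.pySetD dc v nd else dc) P0 := by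
  obtain ⟨hdl, hdu, hvd, hub, hq, hqb, hnd⟩ := H
  by_cases hlt : nd < PySem.List.pyGetD dc v 0
  · simp only [if_pos hlt]
    have hvlen : v < (dc.length : Int) := by rw [hdl]; omega
    have hget : ∀ x : Int, 0 ≤ x →
        PySem.List.pyGetD (PySem.List.pySetD dc v nd) x 0 =
          if x = v then nd else PySem.List.pyGetD dc x 0 :=
      fun x hx => pyGetD_set_int dc v x nd 0 (by omega) hvlen hx
    have hvisv : PySem.List.pyGetD vis v false = false := by
      cases hcon : PySem.List.pyGetD vis v false
      · rfl
      · have := hvd v hv1 hv2 hcon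
        omega
    have hvu' : v ≠ u := by
      rintro rfl
      omega
    refine ⟨[(nd, v)], rfl, by simp, ⟨?_, ?_, ?_, ?_, ?_, ?_, ?_⟩, ⟨?_, ?_, ?_, ?_, ?_⟩⟩
    · rw [PySem.List.length_pySetD]; exact hdl
    · rw [hget u (by omega), if_neg (by omega)]; exact hdu
    · intro x h1 h2 h3
      rw [hget x (by omega), if_neg (by rintro rfl; rw [h3] at hvisv; cases hvisv)]
      exact hvd x h1 h2 h3
    · intro x h1 h2
      rw [hget x (by omega)]
      split
      · have := hub v hv1 hv2; omega
      · exact hub x h1 h2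
    · intro p hp
      rcases List.mem_append.mp hp with hp | hp
      · rw [hget p.2 (by have := hqb p hp; omega)]
        have := hq p hp
        split
        · rename_i hh; rw [hh] at this; omega
        · exact this
      · simp only [List.mem_singleton] at hp
        subst hp
        rw [hget v (by omega), if_pos rfl]
    · intro p hp
      rcases List.mem_append.mp hp with hp | hp
      · exact hqb p hp
      · simp only [List.mem_singleton] at hp
        subst hp
        exact ⟨hv1, hv2⟩
    · rw [List.pairwise_append]
      refine ⟨hnd, by simp [nodeDistinct], ?_⟩
      intro p hp p' hp'
      simp only [List.mem_singleton] at hp'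
      subst hp'
      intro hpv hcon
      simp only at hpv hcon
      have := hq p hp
      rw [hpv] at this
      omega
    · intro x hx
      rw [hget x hx]
      split
      · rename_i hh; rw [hh]; omega
      · exact le_refl _
    · intro x h1 h2 h3
      rw [hget x (by omega), if_neg (by rintro rfl; rw [h3] at hvisv; cases hvisv)]
    · intro x h1 h2
      rw [hget x (by omega)]
      split
      · rename_i hh
        subst hh
        exact Or.inr (by simp)
      · exact Or.inl rfl
    · intro p hp
      simp only [List.mem_singleton] at hp
      subst hp
      have := hub v hv1 hv2
      exact ⟨hv1, hv2, hge, by omega, hvisv, hvu'⟩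
    · intro p hp
      simp only [List.mem_singleton] at hp
      subst hp
      exact hvR
  · simp only [if_neg hlt]
    exact ⟨[], by simp, by simp, ⟨hdl, hdu, hvd, hub, by simpa using hq, by simpa using hqb, by simpa using hnd⟩,
      RelaxC.refl n d u R vis dc⟩

theorem relax_step (n t1 t2 d u : Int) (R : List Int) (vis : List Bool) (dc : List Int) (q : List (Int × Int))
    (e : Int × Int × Int) (H : RelaxH n d u vis dc q) (hE : EdgeOK n e)
    (hn : 1 ≤ n) (hu1 : 1 ≤ u) (hu2 : u ≤ n) (heR : e.1 ∈ R) :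
    ∃ P0, relaxA t1 t2 d (dc, q) e = (relaxB t1 t2 d dc e, q ++ P0) ∧
      P0.length ≤ 2 ∧
      RelaxH n d u vis (relaxB t1 t2 d dc e) (q ++ P0) ∧
      RelaxC n d u R vis dc (relaxB t1 t2 d dc e) P0 := by
  obtain ⟨v, l1, l2⟩ := e
  obtain ⟨hv1, hv2, hl1, hl2⟩ := hE
  simp only at hv1 hv2 hl1 hl2 heR
  obtain ⟨P1, heq1, hlen1, H1, C1⟩ :=
    write_step n d u R vis dc q v (d + l2) H hn hu1 hu2 hv1 hv2 (by omega) heR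
  by_cases hbus : d + l1 ≤ t1 ∨ d ≥ t2
  · obtain ⟨P2, heq2, hlen2, H2, C2⟩ :=
      write_step n d u R vis _ (q ++ P1) v (d + l1) H1 hn hu1 hu2 hv1 hv2 (by omega) heR
    refine ⟨P1 ++ P2, ?_, by simp; omega, by rw [← List.append_assoc]; exact (by simpa [relaxB, hbus] using H2), by simpa [relaxB, hbus] using C1.comp C2⟩
    simp only [relaxA, relaxB, if_pos hbus]
    rw [heq1, heq2, List.append_assoc]
  · refine ⟨P1, ?_, by omega, by simpa [relaxB, hbus] using H1, by simpa [relaxB, hbus] using C1⟩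
    simp only [relaxA, relaxB, if_neg hbus]
    exact heq1

theorem relax_fold (n t1 t2 d u : Int) (R : List Int) (vis : List Bool)
    (edges : List (Int × Int × Int)) (hE : ∀ e ∈ edges, EdgeOK n e)
    (hER : ∀ e ∈ edges, e.1 ∈ R)
    (dc : List Int) (q : List (Int × Int)) (H : RelaxH n d u vis dc q)
    (hn : 1 ≤ n) (hu1 : 1 ≤ u) (hu2 : u ≤ n) :
    ∃ P, edges.foldl (relaxA t1 t2 d) (dc, q) = (edges.foldl (relaxB t1 t2 d) dc, q ++ P) ∧
      P.length ≤ 2 * edges.length ∧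
      RelaxH n d u vis (edges.foldl (relaxB t1 t2 d) dc) (q ++ P) ∧
      RelaxC n d u R vis dc (edges.foldl (relaxB t1 t2 d) dc) P := by
  induction edges generalizing dc q with
  | nil => exact ⟨[], by simp, by simp, by simpa using H, RelaxC.refl n d u R vis dc⟩
  | cons e es ih =>
    obtain ⟨P0, heq0, hlen0, H0, C0⟩ :=
      relax_step n t1 t2 d u R vis dc q e H (hE e List.mem_cons_self) hn hu1 hu2
        (hER e List.mem_cons_self)
    obtain ⟨P2, heq2, hlen2, H2, C2⟩ :=
      ih (fun e' he' => hE e' (List.mem_cons_of_mem _ he'))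
        (fun e' he' => hER e' (List.mem_cons_of_mem _ he')) (relaxB t1 t2 d dc e) (q ++ P0) H0
    refine ⟨P0 ++ P2, ?_, by simp at hlen0 hlen2 ⊢; omega,
      by rw [← List.append_assoc]; exact H2, C0.comp C2⟩
    rw [List.foldl_cons, List.foldl_cons, heq0, heq2, List.append_assoc]





-- ---- B's inner scan ----
theorem scan_keep (dist : List Int) (vis : List Bool) (b u0 : Int) (xs : List Int)
    (h : ∀ x ∈ xs, PySem.List.pyGetD vis x false = false → ¬ PySem.List.pyGetD dist x 0 < b) :
    xs.foldl (fun bu x =>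
      if ¬ PySem.List.pyGetD vis x false = true ∧ PySem.List.pyGetD dist x 0 < bu.1
      then (PySem.List.pyGetD dist x 0, x) else bu) (b, u0) = (b, u0) := by
  induction xs with
  | nil => rfl
  | cons x xs ih =>
    simp only [List.foldl_cons]
    rw [if_neg]
    · exact ih (fun y hy => h y (List.mem_cons_of_mem _ hy))
    · rintro ⟨hv, hlt⟩
      exact h x List.mem_cons_self (by simpa using hv) hlt

theorem scan_gt (dist : List Int) (vis : List Bool) (d : Int) (xs : List Int)
    (h : ∀ x ∈ xs, PySem.List.pyGetD vis x false = false → d < PySem.List.pyGetD dist x 0)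
    (b : Int) (u0 : Int) (hb : d < b) :
    d < (xs.foldl (fun bu x =>
      if ¬ PySem.List.pyGetD vis x false = true ∧ PySem.List.pyGetD dist x 0 < bu.1
      then (PySem.List.pyGetD dist x 0, x) else bu) (b, u0)).1 := by
  induction xs generalizing b u0 with
  | nil => simpa
  | cons x xs ih =>
    simp only [List.foldl_cons]
    split
    · rename_i hc
      exact ih (fun y hy => h y (List.mem_cons_of_mem _ hy)) _ _
        (h x List.mem_cons_self (by simpa using hc.1))
    · exact ih (fun y hy => h y (List.mem_cons_of_mem _ hy)) _ _ hb

theorem scanMin_spec (dist : List Int) (vis : List Bool) (n d u : Int)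
    (hn : 1 ≤ n) (hu1 : 1 ≤ u) (hu2 : u ≤ n)
    (hvu : PySem.List.pyGetD vis u false = false)
    (hdu : PySem.List.pyGetD dist u 0 = d) (hdINF : d < pvINF)
    (hub : ∀ x : Int, 1 ≤ x → x ≤ n → PySem.List.pyGetD dist x 0 ≤ pvINF)
    (hmin : ∀ x : Int, 1 ≤ x → x ≤ n → PySem.List.pyGetD vis x false = false →
      PySem.List.pyGetD dist x 0 < pvINF →
      d < PySem.List.pyGetD dist x 0 ∨ (d = PySem.List.pyGetD dist x 0 ∧ u ≤ x)) :
    scanMin dist vis n = (d, u) := by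
  unfold scanMin
  rw [PySem.List.pyRange_one_append 1 u (n + 1) (by omega) (by omega),
      PySem.List.pyRange_one_cons (a := u) (b := n + 1) (by omega), List.foldl_append, List.foldl_cons]
  have h1 := scan_gt dist vis d (PySem.List.pyRange 1 u)
    (fun x hx hvx => by
      have hxb := PySem.List.mem_pyRange_one.mp hx
      by_cases hfin : PySem.List.pyGetD dist x 0 < pvINF
      · rcases hmin x hxb.1 (by omega) hvx hfin with h | h
        · exact h
        · omega
      · omega) pvINF (-1) hdINF
  rw [if_pos ⟨by simp [hvu], by rw [hdu]; exact h1⟩, hdu]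
  exact scan_keep dist vis d u (PySem.List.pyRange (u + 1) (n + 1))
    (fun x hx hvx => by
      have hxb := PySem.List.mem_pyRange_one.mp hx
      by_cases hfin : PySem.List.pyGetD dist x 0 < pvINF
      · rcases hmin x (by omega) (by omega) hvx hfin with h | h
        · omega
        · omega
      · omega)

theorem scanMin_none (dist : List Int) (vis : List Bool) (n : Int)
    (hub : ∀ x : Int, 1 ≤ x → x ≤ n → PySem.List.pyGetD dist x 0 ≤ pvINF)
    (hno : ∀ x : Int, 1 ≤ x → x ≤ n → PySem.List.pyGetD vis x false = false →
      ¬ PySem.List.pyGetD dist x 0 < pvINF) :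
    scanMin dist vis n = (pvINF, -1) := by
  unfold scanMin
  exact scan_keep dist vis pvINF (-1) _
    (fun x hx hvx => by
      have hxb := PySem.List.mem_pyRange_one.mp hx
      exact hno x hxb.1 (by omega) hvx)

theorem loopB_stall (graph : List (List (Int × Int × Int))) (t1 t2 n : Int)
    (k : Nat) (vis : List Bool) (dist : List Int)
    (hub : ∀ x : Int, 1 ≤ x → x ≤ n → PySem.List.pyGetD dist x 0 ≤ pvINF)
    (hno : ∀ x : Int, 1 ≤ x → x ≤ n → PySem.List.pyGetD vis x false = false →
      ¬ PySem.List.pyGetD dist x 0 < pvINF) :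
    loopB graph t1 t2 n k vis dist = dist := by
  cases k with
  | zero => rfl
  | succ k => simp [loopB, scanMin_none dist vis n hub hno]

-- ---- counting lemmas ----
def unvisCount (vis : List Bool) (n : Int) : Nat :=
  (PySem.List.pyRange 1 (n + 1) 1).countP (fun x => !PySem.List.pyGetD vis x false)

def degSum (graph : List (List (Int × Int × Int))) (vis : List Bool) (n : Int) : Nat :=
  (((PySem.List.pyRange 1 (n + 1) 1).filter (fun x => !PySem.List.pyGetD vis x false)).map
    (fun x => (PySem.List.pyGetD graph x []).length)).sum

theorem filter_flip {f g : Int → Bool} (u : Int) :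
    ∀ xs : List Int, xs.Nodup → u ∈ xs → (∀ x ∈ xs, x ≠ u → f x = g x) →
    g u = true → f u = false → (xs.filter g).Perm (u :: xs.filter f) := by
  intro xs
  induction xs with
  | nil => intro _ hu; simp at hu
  | cons x xs ih =>
    intro hnd hu hfg hg hf
    have hx : x ∉ xs := (List.nodup_cons.mp hnd).1
    have hnd' : xs.Nodup := (List.nodup_cons.mp hnd).2
    by_cases hxu : x = u
    · subst hxu
      have : xs.filter g = xs.filter f := by
        apply List.filter_congr
        intro y hy
        exact (hfg y (List.mem_cons_of_mem _ hy) (by rintro rfl; exact hx hy)).symm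
      simp only [List.filter_cons, hg, hf, if_pos, this]
      simp
    · have hu' : u ∈ xs := by rcases List.mem_cons.mp hu with h | h; exact absurd h.symm hxu; exact h
      have hfx : f x = g x := hfg x List.mem_cons_self hxu
      have hrec := ih hnd' hu' (fun y hy hyu => hfg y (List.mem_cons_of_mem _ hy) hyu) hg hf
      cases hgx : g x
      · simp only [List.filter_cons, hgx, hfx]
        simpa using hrec
      · simp only [List.filter_cons, hgx, hfx]
        simp only [if_pos]
        exact (hrec.cons x).trans (List.Perm.swap _ _ _)

theorem flip_perm (vis : List Bool) (n u : Int) (hn : 1 ≤ n) (hu1 : 1 ≤ u) (hu2 : u ≤ n)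
    (hvl : vis.length = (n + 1).toNat) (hvu : PySem.List.pyGetD vis u false = false) :
    ((PySem.List.pyRange 1 (n + 1) 1).filter (fun x => !PySem.List.pyGetD vis x false)).Perm
      (u :: (PySem.List.pyRange 1 (n + 1) 1).filter
        (fun x => !PySem.List.pyGetD (PySem.List.pySetD vis u true) x false)) := by
  have hulen : u < (vis.length : Int) := by rw [hvl]; omega
  apply filter_flip u
  · exact PySem.List.nodup_pyRange_one _ _
  · exact PySem.List.mem_pyRange_one.mpr ⟨hu1, by omega⟩
  · intro x hx hxu
    have hxb := PySem.List.mem_pyRange_one.mp hx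
    rw [pyGetD_set_int vis u x true false (by omega) hulen (by omega), if_neg hxu]
  · rw [hvu]; rfl
  · rw [pyGetD_set_int vis u u true false (by omega) hulen (by omega), if_pos rfl]; rfl

theorem unvisCount_set (vis : List Bool) (n u : Int) (hn : 1 ≤ n) (hu1 : 1 ≤ u) (hu2 : u ≤ n)
    (hvl : vis.length = (n + 1).toNat) (hvu : PySem.List.pyGetD vis u false = false) :
    unvisCount vis n = unvisCount (PySem.List.pySetD vis u true) n + 1 := by
  have hperm := flip_perm vis n u hn hu1 hu2 hvl hvu
  unfold unvisCount
  rw [List.countP_eq_length_filter, List.countP_eq_length_filter, hperm.length_eq]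
  simp [Nat.add_comm]

theorem degSum_set (graph : List (List (Int × Int × Int))) (vis : List Bool) (n u : Int)
    (hn : 1 ≤ n) (hu1 : 1 ≤ u) (hu2 : u ≤ n)
    (hvl : vis.length = (n + 1).toNat) (hvu : PySem.List.pyGetD vis u false = false) :
    degSum graph vis n =
      degSum graph (PySem.List.pySetD vis u true) n + (PySem.List.pyGetD graph u []).length := by
  have hperm := (flip_perm vis n u hn hu1 hu2 hvl hvu).map
    (fun x => (PySem.List.pyGetD graph x []).length)
  unfold degSum
  rw [hperm.sum_eq]
  simp [Nat.add_comm]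

theorem degSum_le_total (graph : List (List (Int × Int × Int))) (vis : List Bool) (n : Int) :
    degSum graph vis n ≤
      ((PySem.List.pyRange 1 (n + 1) 1).map
        (fun x => (PySem.List.pyGetD graph x []).length)).sum :=
  List.Sublist.sum_le_sum (List.Sublist.map _ List.filter_sublist) (fun _ _ => Nat.zero_le _)

-- ---- reachability closure ----
theorem mem_update_iff {y : Int} (s ys : List Int) :
    y ∈ PySem.Set.update s ys ↔ y ∈ s ∨ y ∈ ys := by
  induction ys generalizing s with
  | nil => simp [PySem.Set.update]
  | cons z zs ih =>
    have : PySem.Set.update s (z :: zs) = PySem.Set.update (PySem.Set.add s z) zs := rfl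
    rw [this, ih]
    rw [PySem.Set.mem_add]
    constructor
    · rintro (( h | h) | h) <;> simp [h]
    · rintro (h | h)
      · exact Or.inl (Or.inl h)
      · rcases List.mem_cons.mp h with h | h
        · exact Or.inl (Or.inr h)
        · exact Or.inr h

theorem mem_foldl_update_iff (graph : List (List (Int × Int × Int))) (y : Int) :
    ∀ (l acc : List Int),
      (y ∈ l.foldl (fun a x => PySem.Set.update a (pvAdj graph x)) acc ↔
        y ∈ acc ∨ ∃ x ∈ l, y ∈ pvAdj graph x) := by
  intro l
  induction l with
  | nil => simp
  | cons z zs ih =>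
    intro acc
    rw [List.foldl_cons, ih, mem_update_iff]
    simp only [List.mem_cons]
    constructor
    · rintro ((h | h) | ⟨x, hx, hy⟩)
      · exact Or.inl h
      · exact Or.inr ⟨z, Or.inl rfl, h⟩
      · exact Or.inr ⟨x, Or.inr hx, hy⟩
    · rintro (h | ⟨x, (rfl | hx), hy⟩)
      · exact Or.inl (Or.inl h)
      · exact Or.inl (Or.inr hy)
      · exact Or.inr ⟨x, hx, hy⟩

theorem mem_reachStep_iff (graph : List (List (Int × Int × Int))) (R : List Int) (y : Int) :
    y ∈ reachStep graph R ↔ y ∈ R ∨ ∃ x ∈ R, y ∈ pvAdj graph x :=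
  mem_foldl_update_iff graph y R R

theorem reachIter_mono (graph : List (List (Int × Int × Int))) (k : Nat) :
    reachIter graph k ⊆ reachIter graph (k + 1) := fun _ hy =>
  (mem_reachStep_iff graph _ _).mpr (Or.inl hy)

theorem reachIter_le (graph : List (List (Int × Int × Int))) {k m : Nat} (h : k ≤ m) :
    reachIter graph k ⊆ reachIter graph m := by
  induction m with
  | zero => cases Nat.le_zero.mp h; exact fun _ hy => hy
  | succ m ih =>
    rcases Nat.lt_or_ge k (m + 1) with h' | h'
    · exact fun y hy => reachIter_mono graph m (ih (by omega) hy)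
    · have : k = m + 1 := by omega
      subst this
      exact fun _ hy => hy

theorem one_mem_reach (graph : List (List (Int × Int × Int))) :
    (1 : Int) ∈ pvReach graph :=
  reachIter_le graph (Nat.zero_le _) (by simp [reachIter])

theorem reach_card_grow (graph : List (List (Int × Int × Int))) :
    ∀ k : Nat, (∀ j < k, ¬ (reachIter graph (j + 1) ⊆ reachIter graph j)) →
      k + 1 ≤ (reachIter graph k).toFinset.card := by
  intro k
  induction k with
  | zero => intro _; simp [reachIter]
  | succ k ih =>
    intro h
    have hk := ih (fun j hj => h j (by omega))
    have hnot := h k (by omega)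
    have hss : (reachIter graph k).toFinset ⊂ (reachIter graph (k + 1)).toFinset := by
      constructor
      · intro y hy
        rw [List.mem_toFinset] at hy ⊢
        exact reachIter_mono graph k hy
      · intro hcon
        exact hnot (fun y hy => by
          have := hcon (List.mem_toFinset.mpr hy)
          exact List.mem_toFinset.mp this)
    have := Finset.card_lt_card hss
    omega

theorem reach_elems (graph : List (List (Int × Int × Int))) :
    ∀ k : Nat, ∀ y ∈ reachIter graph k,
      y = 1 ∨ y ∈ graph.flatMap (fun es => es.map (fun e => e.1)) := by
  intro k
  induction k with
  | zero => intro y hy; simp [reachIter] at hy; exact Or.inl hy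
  | succ k ih =>
    intro y hy
    rcases (mem_reachStep_iff graph _ _).mp hy with hy | ⟨x, _, hyx⟩
    · exact ih y hy
    · right
      unfold pvAdj at hyx
      cases hrow : PySem.List.pyGet? graph x with
      | none =>
        rw [PySem.List.pyGetD_of_none _ _ _ hrow] at hyx
        simp at hyx
      | some row =>
        have hget : PySem.List.pyGetD graph x [] = row := by
          simp [PySem.List.pyGetD, hrow]
        rw [hget] at hyx
        exact List.mem_flatMap.mpr ⟨row, PySem.List.mem_of_pyGet?_eq_some graph hrow, hyx⟩

theorem reach_card_bound (graph : List (List (Int × Int × Int))) (k : Nat) :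
    (reachIter graph k).toFinset.card ≤ (graph.map List.length).sum + 1 := by
  have hsub : (reachIter graph k).toFinset ⊆
      insert (1 : Int) (graph.flatMap (fun es => es.map (fun e => e.1))).toFinset := by
    intro y hy
    rcases reach_elems graph k y (List.mem_toFinset.mp hy) with h | h
    · simp [h]
    · simp [List.mem_toFinset.mpr h]
  calc (reachIter graph k).toFinset.card
      ≤ (insert (1 : Int) (graph.flatMap (fun es => es.map (fun e => e.1))).toFinset).card :=
        Finset.card_le_card hsub
    _ ≤ (graph.flatMap (fun es => es.map (fun e => e.1))).toFinset.card + 1 :=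
        Finset.card_insert_le _ _
    _ ≤ (graph.flatMap (fun es => es.map (fun e => e.1))).length + 1 := by
        have := List.toFinset_card_le (graph.flatMap (fun es => es.map (fun e => e.1)))
        omega
    _ = (graph.map List.length).sum + 1 := by
        rw [List.length_flatMap]
        have hm : List.map (fun a => (List.map (fun e => (e : Int × Int × Int).1) a).length) graph =
            List.map List.length graph :=
          List.map_congr_left (fun es _ => by rw [List.length_map])
        rw [hm]

theorem reach_closed (graph : List (List (Int × Int × Int))) :
    ∀ x ∈ pvReach graph, ∀ y ∈ pvAdj graph x, y ∈ pvReach graph := by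
  set N := (graph.map List.length).sum + 1 with hN
  have hfix : ∃ j < N, reachIter graph (j + 1) ⊆ reachIter graph j := by
    by_contra hcon
    push_neg at hcon
    have h1 := reach_card_grow graph N hcon
    have h2 := reach_card_bound graph N
    omega
  obtain ⟨j, hj, hsub⟩ := hfix
  have hclose : ∀ m : Nat, j ≤ m → reachIter graph m ⊆ reachIter graph j := by
    intro m
    induction m with
    | zero => intro h; cases Nat.le_zero.mp h; exact fun _ hy => hy
    | succ m ih =>
      intro h
      rcases Nat.lt_or_ge j (m + 1) with h' | h'
      · intro y hy
        rcases (mem_reachStep_iff graph _ _).mp hy with hy | ⟨x, hx, hyx⟩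
        · exact ih (by omega) hy
        · exact hsub ((mem_reachStep_iff graph _ _).mpr
            (Or.inr ⟨x, ih (by omega) hx, hyx⟩))
      · have : j = m + 1 := by omega
        subst this
        exact fun _ hy => hy
  intro x hx y hy
  have hxj : x ∈ reachIter graph j := hclose N (by omega) hx
  have : y ∈ reachIter graph (j + 1) :=
    (mem_reachStep_iff graph _ _).mpr (Or.inr ⟨x, hxj, hy⟩)
  exact reachIter_le graph (by omega) (hsub this)

-- ---- the simulation ----
theorem sim (graph : List (List (Int × Int × Int))) (n t1 t2 : Int) (R : List Int)
    (hn : 1 ≤ n)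
    (hclosed : ∀ x ∈ R, ∀ y ∈ pvAdj graph x, y ∈ R)
    (hGood : ∀ x ∈ R, 1 ≤ x ∧ x ≤ n ∧ x < (graph.length : Int) ∧
      ∀ e ∈ PySem.List.pyGetD graph x [], EdgeOK n e) :
    ∀ (fuel : Nat) (pq : List (Int × Int)) (vis : List Bool) (dist : List Int) (k : Nat),
      DijkInv n R pq vis dist →
      pq.length + 2 * degSum graph vis n ≤ fuel →
      unvisCount vis n ≤ k →
      loopA graph t1 t2 fuel pq dist = loopB graph t1 t2 n k vis dist := by
  intro fuel
  induction fuel with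
  | zero =>
    intro pq vis dist k hinv hm hk
    have hpq : pq = [] := by
      cases pq with
      | nil => rfl
      | cons p ps => simp at hm
    subst hpq
    have : loopA graph t1 t2 0 [] dist = dist := rfl
    rw [this]
    symm
    apply loopB_stall graph t1 t2 n k vis dist hinv.hub
    intro x h1 h2 h3 h4
    exact absurd (hinv.hmem x h1 h2 h3 h4) (List.not_mem_nil)
  | succ fuel ih =>
    intro pq vis dist k hinv hm hk
    cases hpop : popMin pq with
    | none =>
      have hpq := popMin_eq_none.mp hpop
      subst hpq
      have : loopA graph t1 t2 (fuel + 1) [] dist = dist := by simp [loopA, popMin]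
      rw [this]
      symm
      apply loopB_stall graph t1 t2 n k vis dist hinv.hub
      intro x h1 h2 h3 h4
      exact absurd (hinv.hmem x h1 h2 h3 h4) (List.not_mem_nil)
    | some mr =>
      obtain ⟨⟨d, u⟩, rest⟩ := mr
      have hperm := popMin_perm hpop
      have hmin := popMin_min hpop
      have hmem_du : (d, u) ∈ pq := hperm.mem_iff.mpr List.mem_cons_self
      have hent := hinv.hent (d, u) hmem_du
      dsimp only at hent
      obtain ⟨hu1, hu2, hdle, hstrict, hdINF⟩ := hent
      have hmem_rest : ∀ p ∈ rest, p ∈ pq := fun p hp =>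
        hperm.mem_iff.mpr (List.mem_cons_of_mem _ hp)
      have hpairs : ((d, u) :: rest).Pairwise nodeDistinct :=
        (List.Perm.pairwise_iff (fun hxy => nodeDistinct_symm hxy) hperm).mp hinv.hnd
      by_cases hskip : d > PySem.List.pyGetD dist u 0
      · have hA : loopA graph t1 t2 (fuel + 1) pq dist = loopA graph t1 t2 fuel rest dist := by
          simp [loopA, hpop, hskip]
        rw [hA]
        apply ih rest vis dist k ?_ ?_ hk
        · refine ⟨hinv.hdl, hinv.hvl, ?_, fun p hp => hinv.hent p (hmem_rest p hp),
            fun p hp => hinv.hvle p (hmem_rest p hp), hpairs.of_cons, hinv.hub,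
            fun p hp => hinv.hRq p (hmem_rest p hp)⟩
          intro x h1 h2 h3 h4
          have := hinv.hmem x h1 h2 h3 h4
          rcases List.mem_cons.mp (hperm.mem_iff.mp this) with heq | h
          · exfalso
            have : PySem.List.pyGetD dist x 0 = d ∧ x = u := by
              constructor <;> [exact congrArg Prod.fst heq; exact congrArg Prod.snd heq]
            obtain ⟨he1, he2⟩ := this
            subst he2
            omega
          · exact h
        · have := hperm.length_eq
          simp at this
          omega
      · -- process u
        have hdu : PySem.List.pyGetD dist u 0 = d := by omega
        have hvu : PySem.List.pyGetD vis u false = false := by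
          cases hv : PySem.List.pyGetD vis u false
          · rfl
          · have := hstrict hv; omega
        have hk1 : 0 < unvisCount vis n := by
          apply List.countP_pos_iff.mpr
          exact ⟨u, PySem.List.mem_pyRange_one.mpr ⟨hu1, by omega⟩, by simp [hvu]⟩
        obtain ⟨k', rfl⟩ : ∃ k', k = k' + 1 := ⟨k - 1, by omega⟩
        have hmin' : ∀ x : Int, 1 ≤ x → x ≤ n → PySem.List.pyGetD vis x false = false →
            PySem.List.pyGetD dist x 0 < pvINF →
            d < PySem.List.pyGetD dist x 0 ∨ (d = PySem.List.pyGetD dist x 0 ∧ u ≤ x) := by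
          intro x h1 h2 h3 h4
          have hle := hmin _ (hinv.hmem x h1 h2 h3 h4)
          rw [pvLe_iff] at hle
          dsimp only at hle
          omega
        have hscan : scanMin dist vis n = (d, u) :=
          scanMin_spec dist vis n d u hn hu1 hu2 hvu hdu hdINF hinv.hub hmin'
        have hne : (u == (-1 : Int)) = false := by
          rw [beq_eq_false_iff_ne]
          omega
        -- the relaxation fold
        have huR : u ∈ R := hinv.hRq (d, u) hmem_du
        have hEok : ∀ e ∈ PySem.List.pyGetD graph u [], EdgeOK n e :=
          (hGood u huR).2.2.2
        have hER : ∀ e ∈ PySem.List.pyGetD graph u [], e.1 ∈ R := fun e he =>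
          hclosed u huR e.1 (List.mem_map_of_mem he)
        have H0 : RelaxH n d u vis dist rest := by
          refine ⟨hinv.hdl, hdu, ?_, hinv.hub, ?_, ?_, hpairs.of_cons⟩
          · intro x h1 h2 h3
            exact hinv.hvle (d, u) hmem_du x h1 h2 h3
          · intro p hp
            exact (hinv.hent p (hmem_rest p hp)).2.2.1
          · intro p hp
            exact ⟨(hinv.hent p (hmem_rest p hp)).1, (hinv.hent p (hmem_rest p hp)).2.1⟩
        obtain ⟨P, heqf, hlenP, Hf, Cf⟩ :=
          relax_fold n t1 t2 d u R vis (PySem.List.pyGetD graph u []) hEok hER dist rest H0 hn hu1 hu2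
        have hulen : u < (vis.length : Int) := by rw [hinv.hvl]; omega
        have hgetv : ∀ x : Int, 0 ≤ x →
            PySem.List.pyGetD (PySem.List.pySetD vis u true) x false =
              if x = u then true else PySem.List.pyGetD vis x false :=
          fun x hx => pyGetD_set_int vis u x true false (by omega) hulen hx
        have hA : loopA graph t1 t2 (fuel + 1) pq dist =
            loopA graph t1 t2 fuel (rest ++ P)
              ((PySem.List.pyGetD graph u []).foldl (relaxB t1 t2 d) dist) := by
          simp [loopA, hpop, hskip, heqf]
        have hB : loopB graph t1 t2 n (k' + 1) vis dist =
            loopB graph t1 t2 n k' (PySem.List.pySetD vis u true)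
              ((PySem.List.pyGetD graph u []).foldl (relaxB t1 t2 d) dist) := by
          simp [loopB, hscan, hne, hdu]
        rw [hA, hB]
        apply ih
        · -- the invariant after processing u
          refine ⟨Hf.hdl, by rw [PySem.List.length_pySetD]; exact hinv.hvl, ?_, ?_, ?_, Hf.hnd, ?_, ?_⟩
          · -- hmem
            intro x h1 h2 h3 h4
            rw [hgetv x (by omega)] at h3
            have hxu : ¬ x = u := by intro hxx; rw [if_pos hxx] at h3; cases h3
            rw [if_neg hxu] at h3
            rcases Cf.hnew x h1 h2 with heq | hmemP
            · rw [heq] at h4 ⊢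
              rcases List.mem_cons.mp (hperm.mem_iff.mp (hinv.hmem x h1 h2 h3 h4)) with heq2 | h
              · exact absurd (congrArg Prod.snd heq2) hxu
              · exact List.mem_append_left _ h
            · exact List.mem_append_right _ hmemP
          · -- hent
            intro p hp
            rcases List.mem_append.mp hp with hp | hp
            · obtain ⟨hp1, hp2, hp3, hp4, hp5⟩ := hinv.hent p (hmem_rest p hp)
              refine ⟨hp1, hp2, le_trans (Cf.hle p.2 (by omega)) hp3, ?_, hp5⟩
              intro hvp
              rw [hgetv p.2 (by omega)] at hvp
              by_cases hpu : p.2 = u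
              · have hnd' := (List.pairwise_cons.mp hpairs).1 p hp
                have hne' : d ≠ p.1 := hnd' (by dsimp only; omega)
                rw [hpu] at hp3 ⊢
                rw [hdu] at hp3
                rw [Hf.hdu]
                omega
              · rw [if_neg hpu] at hvp
                rw [Cf.hfix p.2 hp1 hp2 hvp]
                exact hp4 hvp
            · obtain ⟨hp1, hp2, hp3, hp4, hp5, hp6⟩ := Cf.hP p hp
              refine ⟨hp1, hp2, Hf.hq p (List.mem_append_right _ hp), ?_, hp4⟩
              intro hvp
              rw [hgetv p.2 (by omega), if_neg hp6] at hvp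
              rw [hvp] at hp5
              cases hp5
          · -- hvle
            intro p hp w h1 h2 h3
            rw [hgetv w (by omega)] at h3
            by_cases hwu : w = u
            · subst hwu
              rw [Hf.hdu]
              rcases List.mem_append.mp hp with hp | hp
              · have := hmin _ (hmem_rest p hp)
                rw [pvLe_iff] at this
                dsimp only at this
                omega
              · exact (Cf.hP p hp).2.2.1
            · rw [if_neg hwu] at h3
              rw [Cf.hfix w h1 h2 h3]
              rcases List.mem_append.mp hp with hp | hp
              · exact hinv.hvle p (hmem_rest p hp) w h1 h2 h3
              · have h5 := (Cf.hP p hp).2.2.1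
                have h6 := hinv.hvle (d, u) hmem_du w h1 h2 h3
                dsimp only at h6
                omega
          · -- hub
            intro x h1 h2
            exact le_trans (Cf.hle x (by omega)) (hinv.hub x h1 h2)
          · -- hRq
            intro p hp
            rcases List.mem_append.mp hp with hp | hp
            · exact hinv.hRq p (hmem_rest p hp)
            · exact Cf.hPT p hp
        · -- measure
          have hlen := hperm.length_eq
          simp only [List.length_cons] at hlen
          have hdeg := degSum_set graph vis n u hn hu1 hu2 hinv.hvl hvu
          simp only [List.length_append]
          omega
        · -- count
          have hcnt := unvisCount_set vis n u hn hu1 hu2 hinv.hvl hvu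
          omega

-- ===== VERDICT (by name: the statement is the Claim_ definition above) =====
theorem check_spec : Claim_equal_check := by
  intro L dbn graph n t1 t2 t0 hdom hpre
  obtain ⟨hn, hGoodAll⟩ := hpre
  have hL : -2147483648 ≤ L ∧ L ≤ 2147483648 := by
    unfold Dom_check at hdom
    simp only [Bool.and_eq_true, pvDomInt, decide_eq_true_eq] at hdom
    exact hdom.1.1.1.1.1.1
  have hINFval : pvINF = 1000000000000000000 := by norm_num [pvINF]
  have hclosed := reach_closed graph
  have hGood : ∀ x ∈ pvReach graph, 1 ≤ x ∧ x ≤ n ∧ x < (graph.length : Int) ∧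
      ∀ e ∈ PySem.List.pyGetD graph x [], EdgeOK n e := by
    intro x hx
    obtain ⟨h1, h2, h3, _, h5⟩ := hGoodAll x hx
    exact ⟨h1, h2, h3, h5⟩
  unfold Spec_check check check_alt
  dsimp only
  have hdlen : (List.replicate (n + 1).toNat pvINF).length = (n + 1).toNat :=
    List.length_replicate
  have h1len : (1 : Int) < ((List.replicate (n + 1).toNat pvINF).length : Int) := by
    rw [hdlen]; omega
  have hget1 : ∀ x : Int, 0 ≤ x →
      PySem.List.pyGetD (PySem.List.pySetD (List.replicate (n + 1).toNat pvINF) 1 L) x 0 =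
        if x = 1 then L else PySem.List.pyGetD (List.replicate (n + 1).toNat pvINF) x 0 :=
    fun x hx => pyGetD_set_int _ 1 x L 0 (by omega) h1len hx
  have hrep : ∀ x : Int, 0 ≤ x → x ≤ n →
      PySem.List.pyGetD (List.replicate (n + 1).toNat pvINF) x 0 = pvINF := by
    intro x h1 h2
    rw [PySem.List.pyGetD_eq_getElem _ 0 h1 (by rw [hdlen]; omega)]
    exact List.getElem_replicate _
  have hgd : ∀ x : Int, 1 ≤ x → x ≤ n →
      PySem.List.pyGetD (PySem.List.pySetD (List.replicate (n + 1).toNat pvINF) 1 L) x 0 =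
        if x = 1 then L else pvINF := by
    intro x h1 h2
    rw [hget1 x (by omega)]
    split
    · rfl
    · exact hrep x (by omega) h2
  have hgv : ∀ x : Int, 0 ≤ x →
      PySem.List.pyGetD (List.replicate (n + 1).toNat false) x false = false := by
    intro x h1
    by_cases hx : x < ((n + 1).toNat : Int)
    · rw [PySem.List.pyGetD_eq_getElem _ false h1 (by rw [List.length_replicate]; exact hx)]
      exact List.getElem_replicate _
    · apply PySem.List.pyGetD_of_none
      rw [PySem.List.pyGet?_eq_none_iff]
      unfold PySem.Raise.InRange
      rw [List.length_replicate]
      omega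
  have hinv : DijkInv n (pvReach graph) [(L, 1)] (List.replicate (n + 1).toNat false)
      (PySem.List.pySetD (List.replicate (n + 1).toNat pvINF) 1 L) := by
    refine ⟨by rw [PySem.List.length_pySetD, hdlen], List.length_replicate, ?_, ?_, ?_, ?_, ?_, ?_⟩
    · intro x h1 h2 h3 h4
      rw [hgd x h1 h2] at h4 ⊢
      by_cases hx1 : x = 1
      · rw [if_pos hx1] at h4 ⊢
        subst hx1
        simp
      · rw [if_neg hx1] at h4
        omega
    · intro p hp
      simp only [List.mem_singleton] at hp
      subst hp
      dsimp only
      rw [hgd 1 (by omega) hn, if_pos rfl, hgv 1 (by omega)]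
      exact ⟨by omega, hn, le_refl _, ⟨fun h => by simp at h, by omega⟩⟩
    · intro p hp w h1 h2 h3
      rw [hgv w (by omega)] at h3
      cases h3
    · simp [nodeDistinct]
    · intro x h1 h2
      rw [hgd x h1 h2]
      split <;> omega
    · intro p hp
      simp only [List.mem_singleton] at hp
      subst hp
      exact one_mem_reach graph
  have hmeas : [(L, 1)].length + 2 * degSum graph (List.replicate (n + 1).toNat false) n ≤
      1 + 2 * ((PySem.List.pyRange 1 (n + 1) 1).map
        (fun x => (PySem.List.pyGetD graph x []).length)).sum + (n + 1).toNat := by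
    have := degSum_le_total graph (List.replicate (n + 1).toNat false) n
    simp only [List.length_singleton]
    omega
  have hcnt : unvisCount (List.replicate (n + 1).toNat false) n ≤ n.toNat := by
    unfold unvisCount
    calc (PySem.List.pyRange 1 (n + 1) 1).countP _ ≤ (PySem.List.pyRange 1 (n + 1) 1).length :=
          List.countP_le_length
      _ = n.toNat := by rw [PySem.List.length_pyRange_one]; omega
  have hsim := sim graph n t1 t2 (pvReach graph) hn hclosed hGood
    (1 + 2 * ((PySem.List.pyRange 1 (n + 1) 1).map
      (fun x => (PySem.List.pyGetD graph x []).length)).sum + (n + 1).toNat) [(L, 1)]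
    (List.replicate (n + 1).toNat false)
    (PySem.List.pySetD (List.replicate (n + 1).toNat pvINF) 1 L) n.toNat hinv hmeas hcnt
  rw [hsim]
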